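-- pv_equiv track=rewrite | github.com/Abhineetraj07/agent-marketplace | filmbot_v2/ui.py | get_retrieval_mode
-- ===== SOURCE A (Python) =====
-- def get_retrieval_mode(tools_used: list[str]) -> str:
--     modes = set()
--     for t in tools_used:
--         if t in ("list_tables", "get_schema", "execute_sql"):
--             modes.add("SQL")
--         elif t == "vector_search":
--             modes.add("Vector Search")
--         elif t in ("graph_schema", "query_knowledge_graph"):
--             modes.add("Knowledge Graph")
--     return " + ".join(sorted(modes)) if modes else "Direct"
-- ===== SOURCE B (Python) =====
-- # Category table, alphabetical by label so the joined output needs no sort.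
-- _CATEGORIES = [
--     ("Knowledge Graph", {"graph_schema", "query_knowledge_graph"}),
--     ("SQL", {"list_tables", "get_schema", "execute_sql"}),
--     ("Vector Search", {"vector_search"}),
-- ]
--
-- def get_retrieval_mode(tools_used: list[str]) -> str:
--     tools_set = set(tools_used)
--     modes = [label for label, triggers in _CATEGORIES
--              if not triggers.isdisjoint(tools_set)]
--     return " + ".join(modes) if modes else "Direct"
-- ===== Notes on version B (the rewrite author's own statement) =====
-- stated objective: alternative
-- what changed: B inverts the traversal: instead of classifying each tool into a growing set and sorting it, B builds set(tools_used) once and loops over a fixed alphabetically-ordered (label, trigger-set) table, keeping labels whose triggers intersect the tool set, so no sort is needed.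
import Mathlib
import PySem

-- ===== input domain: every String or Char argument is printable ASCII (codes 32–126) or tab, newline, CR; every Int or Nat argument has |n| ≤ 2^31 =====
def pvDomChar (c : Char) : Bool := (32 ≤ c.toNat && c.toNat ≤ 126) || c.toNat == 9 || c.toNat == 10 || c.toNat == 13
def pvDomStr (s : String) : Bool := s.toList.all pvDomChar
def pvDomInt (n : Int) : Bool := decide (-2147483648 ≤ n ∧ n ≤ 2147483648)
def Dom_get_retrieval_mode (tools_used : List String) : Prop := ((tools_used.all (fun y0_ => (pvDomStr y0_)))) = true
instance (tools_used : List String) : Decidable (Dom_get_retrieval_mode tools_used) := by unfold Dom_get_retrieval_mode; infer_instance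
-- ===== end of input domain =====

-- B replaces A's per-tool classification loop + sort by a single pass over a fixed
-- alphabetically-ordered (label, trigger-set) table tested against set(tools_used) (objective: alternative).


-- ===== PORT A =====
def get_retrieval_mode (tools_used : List String) : String :=
  let modes : PySem.Set String :=
    tools_used.foldl
      (fun (modes : PySem.Set String) t =>
        if t = "list_tables" ∨ t = "get_schema" ∨ t = "execute_sql" then
          PySem.Set.add modes "SQL"
        else if t = "vector_search" then
          PySem.Set.add modes "Vector Search"
        else if t = "graph_schema" ∨ t = "query_knowledge_graph" then
          PySem.Set.add modes "Knowledge Graph"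
        else modes)
      PySem.Set.empty
  if modes ≠ [] then PySem.Str.join " + " (PySem.List.sorted modes (fun x => x) false)
  else "Direct"

-- ===== PORT B =====
-- category table, alphabetical by label (so the joined output needs no sort)
def pvCategories : List (String × List String) :=
  [("Knowledge Graph", ["graph_schema", "query_knowledge_graph"]),
   ("SQL", ["list_tables", "get_schema", "execute_sql"]),
   ("Vector Search", ["vector_search"])]

def get_retrieval_mode_alt (tools_used : List String) : String :=
  let toolsSet : PySem.Set String := PySem.Set.ofList tools_used
  let modes : List String :=
    (pvCategories.filter
      (fun p => !(PySem.Set.isdisjoint (PySem.Set.ofList p.2) toolsSet))).map Prod.fst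
  if modes ≠ [] then PySem.Str.join " + " modes else "Direct"

-- ===== PRECONDITION & SPEC =====
def Spec_get_retrieval_mode (tools_used : List String) (out : String) : Prop := out = get_retrieval_mode_alt tools_used
instance (tools_used : List String) (out : String) : Decidable (Spec_get_retrieval_mode tools_used out) := by unfold Spec_get_retrieval_mode; infer_instance

-- ===== CLAIM (what is proved, stated in full; the proofs are below) =====
def Claim_equal_get_retrieval_mode : Prop := ∀ (tools_used : List String), Dom_get_retrieval_mode tools_used → Spec_get_retrieval_mode tools_used (get_retrieval_mode tools_used)

-- ===== LEMMAS AND PROOFS =====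

-- which label (if any) A's branch chain assigns to a tool
def pvClassify (t : String) : Option String :=
  if t = "list_tables" ∨ t = "get_schema" ∨ t = "execute_sql" then some "SQL"
  else if t = "vector_search" then some "Vector Search"
  else if t = "graph_schema" ∨ t = "query_knowledge_graph" then some "Knowledge Graph"
  else none

def pvStep (s : PySem.Set String) (t : String) : PySem.Set String :=
  if t = "list_tables" ∨ t = "get_schema" ∨ t = "execute_sql" then
    PySem.Set.add s "SQL"
  else if t = "vector_search" then
    PySem.Set.add s "Vector Search"
  else if t = "graph_schema" ∨ t = "query_knowledge_graph" then
    PySem.Set.add s "Knowledge Graph"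
  else s

theorem pvStep_eq (s : PySem.Set String) (t : String) :
    pvStep s t = match pvClassify t with
      | some L => PySem.Set.add s L
      | none => s := by
  unfold pvStep pvClassify; split_ifs <;> rfl

theorem pvClassify_labels (t L : String) (h : pvClassify t = some L) :
    L = "SQL" ∨ L = "Vector Search" ∨ L = "Knowledge Graph" := by
  unfold pvClassify at h; split_ifs at h <;> simp_all

theorem pv_mem_foldl (tools : List String) (s : PySem.Set String) (L : String) :
    L ∈ tools.foldl pvStep s ↔ L ∈ s ∨ ∃ t ∈ tools, pvClassify t = some L := by
  induction tools generalizing s with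
  | nil => simp
  | cons t ts ih =>
    simp only [List.foldl_cons, ih, pvStep_eq]
    cases hc : pvClassify t with
    | none =>
      simp only [List.mem_cons]
      constructor
      · rintro (h | ⟨u, hu, hcu⟩)
        · exact Or.inl h
        · exact Or.inr ⟨u, Or.inr hu, hcu⟩
      · rintro (h | ⟨u, (rfl | hu), hcu⟩)
        · exact Or.inl h
        · rw [hc] at hcu; cases hcu
        · exact Or.inr ⟨u, hu, hcu⟩
    | some M =>
      simp only [PySem.Set.mem_add, List.mem_cons]
      constructor
      · rintro ((h | rfl) | ⟨u, hu, hcu⟩)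
        · exact Or.inl h
        · exact Or.inr ⟨t, Or.inl rfl, hc⟩
        · exact Or.inr ⟨u, Or.inr hu, hcu⟩
      · rintro (h | ⟨u, (rfl | hu), hcu⟩)
        · exact Or.inl (Or.inl h)
        · rw [hc] at hcu; exact Or.inl (Or.inr (Option.some.inj hcu).symm)
        · exact Or.inr ⟨u, hu, hcu⟩

theorem pv_nodup_foldl (tools : List String) (s : PySem.Set String) (hs : s.Nodup) :
    (tools.foldl pvStep s).Nodup := by
  induction tools generalizing s with
  | nil => exact hs
  | cons t ts ih =>
    refine ih _ ?_
    rw [pvStep_eq]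
    cases pvClassify t with
    | none => exact hs
    | some L => exact PySem.Set.nodup_add _ _ hs

-- the alphabetically ordered label list determined by the three flags
def pvCanon (kg sql vs : Bool) : List String :=
  (if kg then ["Knowledge Graph"] else []) ++ (if sql then ["SQL"] else [])
    ++ (if vs then ["Vector Search"] else [])

theorem pv_canon_mem (kg sql vs : Bool) (x : String) :
    x ∈ pvCanon kg sql vs ↔
      (kg = true ∧ x = "Knowledge Graph") ∨ (sql = true ∧ x = "SQL")
        ∨ (vs = true ∧ x = "Vector Search") := by
  unfold pvCanon; split_ifs <;> simp_all

theorem pv_sorted_eq_canon (m : List String) (hn : m.Nodup)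
    (hsub : ∀ x ∈ m, x = "SQL" ∨ x = "Vector Search" ∨ x = "Knowledge Graph") :
    PySem.List.sorted m (fun x => x) false =
      pvCanon (decide ("Knowledge Graph" ∈ m)) (decide ("SQL" ∈ m))
        (decide ("Vector Search" ∈ m)) := by
  apply PySem.List.sorted_eq_of_perm_of_pairwise_lt
  · have hcn : (pvCanon (decide ("Knowledge Graph" ∈ m)) (decide ("SQL" ∈ m))
        (decide ("Vector Search" ∈ m))).Nodup := by
      unfold pvCanon; split_ifs <;> decide
    rw [List.perm_ext_iff_of_nodup hcn hn]
    intro x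
    rw [pv_canon_mem]
    simp only [decide_eq_true_eq]
    constructor
    · rintro (⟨h, rfl⟩ | ⟨h, rfl⟩ | ⟨h, rfl⟩) <;> exact h
    · intro hx
      rcases hsub x hx with rfl | rfl | rfl
      · exact Or.inr (Or.inl ⟨hx, rfl⟩)
      · exact Or.inr (Or.inr ⟨hx, rfl⟩)
      · exact Or.inl ⟨hx, rfl⟩
  · unfold pvCanon
    split_ifs <;> simp [List.pairwise_cons, String.lt_iff_toList_lt] <;> decide

theorem pv_trigger_iff (tools : List String) (L : String) (trigs : List String)
    (htr : ∀ t, pvClassify t = some L ↔ t ∈ trigs) :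
    (∃ t ∈ trigs, t ∈ tools) ↔ ∃ t ∈ tools, pvClassify t = some L := by
  constructor
  · rintro ⟨t, ht, htl⟩; exact ⟨t, htl, (htr t).mpr ht⟩
  · rintro ⟨t, htl, hc⟩; exact ⟨t, (htr t).mp hc, htl⟩

theorem pv_classify_iff (t : String) :
    (pvClassify t = some "SQL" ↔ t ∈ ["list_tables", "get_schema", "execute_sql"]) ∧
    (pvClassify t = some "Vector Search" ↔ t ∈ ["vector_search"]) ∧
    (pvClassify t = some "Knowledge Graph" ↔ t ∈ ["graph_schema", "query_knowledge_graph"]) := by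
  rcases eq_or_ne t "list_tables" with rfl | n1
  · decide
  rcases eq_or_ne t "get_schema" with rfl | n2
  · decide
  rcases eq_or_ne t "execute_sql" with rfl | n3
  · decide
  rcases eq_or_ne t "vector_search" with rfl | n4
  · decide
  rcases eq_or_ne t "graph_schema" with rfl | n5
  · decide
  rcases eq_or_ne t "query_knowledge_graph" with rfl | n6
  · decide
  simp [pvClassify, n1, n2, n3, n4, n5, n6]

-- ===== VERDICT (by name: the statement is the Claim_ definition above) =====
theorem get_retrieval_mode_spec : Claim_equal_get_retrieval_mode := by
  intro tools _
  unfold Spec_get_retrieval_mode get_retrieval_mode get_retrieval_mode_alt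
  have hstep : ∀ (s : PySem.Set String),
      tools.foldl
        (fun (modes : PySem.Set String) t =>
          if t = "list_tables" ∨ t = "get_schema" ∨ t = "execute_sql" then
            PySem.Set.add modes "SQL"
          else if t = "vector_search" then
            PySem.Set.add modes "Vector Search"
          else if t = "graph_schema" ∨ t = "query_knowledge_graph" then
            PySem.Set.add modes "Knowledge Graph"
          else modes) s = tools.foldl pvStep s := by
    intro s; rfl
  rw [hstep]
  set m := tools.foldl pvStep PySem.Set.empty with hm
  have hmem : ∀ L, L ∈ m ↔ ∃ t ∈ tools, pvClassify t = some L := by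
    intro L
    rw [hm, pv_mem_foldl]
    simp [PySem.Set.empty]
  have hnodup : m.Nodup := pv_nodup_foldl tools _ (by simp [PySem.Set.empty])
  have hsub : ∀ x ∈ m, x = "SQL" ∨ x = "Vector Search" ∨ x = "Knowledge Graph" := by
    intro x hx
    obtain ⟨t, _, hc⟩ := (hmem x).mp hx
    exact pvClassify_labels t x hc
  -- B's flag for each category = membership of the label in A's set
  have hflag : ∀ (L : String) (trigs : List String),
      (∀ t, pvClassify t = some L ↔ t ∈ trigs) →
      (!(PySem.Set.isdisjoint (PySem.Set.ofList trigs) (PySem.Set.ofList tools))) =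
        decide (L ∈ m) := by
    intro L trigs htr
    have hiff : L ∈ m ↔ ∃ t ∈ trigs, t ∈ tools := by
      rw [hmem]; exact (pv_trigger_iff tools L trigs htr).symm
    by_cases h : L ∈ m
    · obtain ⟨t, ht, htl⟩ := hiff.mp h
      have hb : PySem.Set.isdisjoint (PySem.Set.ofList trigs) (PySem.Set.ofList tools)
          = false := by
        cases hb : PySem.Set.isdisjoint (PySem.Set.ofList trigs) (PySem.Set.ofList tools) with
        | false => rfl
        | true =>
          exact (((PySem.Set.isdisjoint_iff _ _).mp hb t ((PySem.Set.mem_ofList _ _).mpr ht))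
            ((PySem.Set.mem_ofList _ _).mpr htl)).elim
      rw [hb]; simp [h]
    · have hb : PySem.Set.isdisjoint (PySem.Set.ofList trigs) (PySem.Set.ofList tools)
          = true :=
        (PySem.Set.isdisjoint_iff _ _).mpr (fun x hx hxt =>
          h (hiff.mpr ⟨x, (PySem.Set.mem_ofList _ _).mp hx, (PySem.Set.mem_ofList _ _).mp hxt⟩))
      rw [hb]; simp [h]
  have e1 := hflag "Knowledge Graph" ["graph_schema", "query_knowledge_graph"]
    (fun t => (pv_classify_iff t).2.2)
  have e2 := hflag "SQL" ["list_tables", "get_schema", "execute_sql"]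
    (fun t => (pv_classify_iff t).1)
  have e3 := hflag "Vector Search" ["vector_search"]
    (fun t => (pv_classify_iff t).2.1)
  -- B's modes list is the canonical list of A's label set
  have hBmodes :
      ((pvCategories.filter
        (fun p => !(PySem.Set.isdisjoint (PySem.Set.ofList p.2)
          (PySem.Set.ofList tools)))).map Prod.fst) =
      pvCanon (decide ("Knowledge Graph" ∈ m)) (decide ("SQL" ∈ m))
        (decide ("Vector Search" ∈ m)) := by
    simp only [pvCategories, List.filter, e1, e2, e3, pvCanon]
    by_cases h1 : "Knowledge Graph" ∈ m <;> by_cases h2 : "SQL" ∈ m <;>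
      by_cases h3 : "Vector Search" ∈ m <;> simp [h1, h2, h3]
  have hsorted := pv_sorted_eq_canon m hnodup hsub
  -- the two emptiness tests agree
  have hempty : m = [] ↔ pvCanon (decide ("Knowledge Graph" ∈ m)) (decide ("SQL" ∈ m))
      (decide ("Vector Search" ∈ m)) = [] := by
    rw [← hsorted, PySem.List.sorted_eq_nil_iff]
  show (if m ≠ [] then PySem.Str.join " + " (PySem.List.sorted m (fun x => x) false)
      else "Direct") =
    (if ((pvCategories.filter
        (fun p => !(PySem.Set.isdisjoint (PySem.Set.ofList p.2)
          (PySem.Set.ofList tools)))).map Prod.fst) ≠ [] then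
      PySem.Str.join " + " ((pvCategories.filter
        (fun p => !(PySem.Set.isdisjoint (PySem.Set.ofList p.2)
          (PySem.Set.ofList tools)))).map Prod.fst)
    else "Direct")
  rw [hBmodes, hsorted]
  by_cases hme : m = []
  · rw [if_neg (by simpa using hme), if_neg (by simpa using hempty.mp hme)]
  · rw [if_pos (by simpa using hme), if_pos (by simpa using fun h => hme (hempty.mpr h))]
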